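-- pv_equiv track=rewrite | github.com/PeterEGFIbrahim/FMOPhore | FMOPhore/modules/FMOPhore_sep_LIGs.py | modify_atom_names
-- ===== SOURCE A (Python) =====
-- def modify_atom_names(pdb_lines):
--     atom_names = set()
--     for i, line in enumerate(pdb_lines):
--         record_type = line[:6].strip()
--         if record_type in ['HETATM']:
--             residue_name = line[17:20].strip()
--             atom_name = line[11:16].strip()
--             if residue_name + atom_name in atom_names:
--                 if atom_name[-1].isdigit():
--                     new_atom_name = atom_name[:-1] + str(int(atom_name[-1]) + 3)
--                 else:
--                     new_atom_name = atom_name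
--                 pdb_lines[i] = line[:12] + new_atom_name.ljust(4) + line[16:]
--             else:
--                 atom_names.add(residue_name + atom_name)
--     return pdb_lines
-- ===== SOURCE B (Python) =====
-- def modify_atom_names(pdb_lines):
--     # Pass 1: index of the first HETATM occurrence of each residue+atom key.
--     first = {}
--     for i, line in enumerate(pdb_lines):
--         if line[:6].strip() == 'HETATM':
--             first.setdefault(line[17:20].strip() + line[11:16].strip(), i)
--     # Pass 2: rewrite every HETATM line that is not the first occurrence of its key.
--     for i, line in enumerate(pdb_lines):
--         if line[:6].strip() != 'HETATM':
--             continue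
--         atom_name = line[11:16].strip()
--         if first[line[17:20].strip() + atom_name] != i:
--             if atom_name[-1].isdigit():
--                 atom_name = atom_name[:-1] + str(int(atom_name[-1]) + 3)
--             pdb_lines[i] = line[:12] + atom_name.ljust(4) + line[16:]
--     return pdb_lines
-- ===== Notes on version B (the rewrite author's own statement) =====
-- stated objective: alternative
-- what changed: Replaces A's single pass that threads a grows-as-you-go set of seen keys by two independent passes: first build a dict mapping each residue+atom key to the index of its first HETATM occurrence (setdefault), then rewrite exactly the HETATM lines whose index differs from that stored first index.
import Mathlib
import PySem

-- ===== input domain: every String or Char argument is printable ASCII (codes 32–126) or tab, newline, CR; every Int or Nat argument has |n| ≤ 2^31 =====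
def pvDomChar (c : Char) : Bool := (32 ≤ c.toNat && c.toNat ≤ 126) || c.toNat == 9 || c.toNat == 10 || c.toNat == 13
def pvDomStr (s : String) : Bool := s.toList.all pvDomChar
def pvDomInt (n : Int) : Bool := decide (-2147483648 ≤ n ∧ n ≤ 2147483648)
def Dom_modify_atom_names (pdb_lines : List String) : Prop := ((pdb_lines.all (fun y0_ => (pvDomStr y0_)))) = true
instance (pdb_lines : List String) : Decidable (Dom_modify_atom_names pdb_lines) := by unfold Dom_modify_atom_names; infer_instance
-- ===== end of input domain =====

-- B replaces A's single pass threading a set of already-seen keys by two passes: a first-occurrence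
-- index dict, then a rewrite of every HETATM line that is not the first occurrence of its key
-- (same in-place mutation of the argument list; equal return value proved below).


-- shared transliteration helpers (both Pythons compute these identical slices/rewrites)
-- line[:6].strip() == 'HETATM'  (A's 'in ["HETATM"]' is the same test)
def pvIsHet (cs : List Char) : Bool := PySem.Chars.strip (PySem.Chars.slice cs (some 0) (some 6)) == "HETATM".toList
-- residue_name + atom_name  = line[17:20].strip() + line[11:16].strip()
def pvAtom (cs : List Char) : List Char := PySem.Chars.strip (PySem.Chars.slice cs (some 11) (some 16))
def pvKey (cs : List Char) : List Char := PySem.Chars.strip (PySem.Chars.slice cs (some 17) (some 20)) ++ pvAtom cs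
-- atom_name[:-1] + str(int(atom_name[-1]) + 3) if atom_name[-1].isdigit() else atom_name
-- (the 'none' branch is Python's IndexError on an empty atom name; excluded by Pre_)
def pvNewName (atom : List Char) : List Char :=
  match PySem.List.pyGet? atom (-1) with
  | some c =>
      if PySem.Chars.isdigit c then
        PySem.Chars.slice atom none (some (-1)) ++ PySem.Int.toChars ((PySem.Int.ofChars? [c]).getD 0 + 3)
      else atom
  | none => atom
-- s.ljust(4): pad on the right with spaces to length 4 (exact: ljust pads with ' ')
def pvLjust4 (cs : List Char) : List Char := cs ++ List.replicate (4 - cs.length) ' '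
-- line[:12] + new_atom_name.ljust(4) + line[16:]
def pvRewrite (cs : List Char) : List Char :=
  PySem.Chars.slice cs none (some 12) ++ pvLjust4 (pvNewName (pvAtom cs)) ++ PySem.Chars.slice cs (some 16) none

-- ===== PORT A =====
-- A's single pass: thread the set of residue+atom keys already seen; a repeated key rewrites the line
def pvLoopA : List String → PySem.Set (List Char) → List String
  | [], _ => []
  | line :: rest, seen =>
    let cs := line.toList
    if pvIsHet cs then
      if PySem.Set.contains seen (pvKey cs) then
        String.ofList (pvRewrite cs) :: pvLoopA rest seen
      else
        line :: pvLoopA rest (PySem.Set.add seen (pvKey cs))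
    else line :: pvLoopA rest seen

def modify_atom_names (pdb_lines : List String) : List String :=
  pvLoopA pdb_lines PySem.Set.empty

-- ===== PORT B =====
-- pass 1: first.setdefault(key, i) over enumerate(pdb_lines)
def pvFirst : Int → List String → PySem.Dict (List Char) Int → PySem.Dict (List Char) Int
  | _, [], d => d
  | i, line :: rest, d =>
    pvFirst (i + 1) rest (if pvIsHet line.toList then d.setdefault (pvKey line.toList) i else d)

-- pass 2: rewrite line i iff it is HETATM and first[key] != i (the 'none' branch is unreachable:
-- pass 1 recorded every HETATM key; kept only to make the lookup total)
def pvPass2 (first : PySem.Dict (List Char) Int) : Int → List String → List String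
  | _, [] => []
  | i, line :: rest =>
    (if pvIsHet line.toList then
       match first.get? (pvKey line.toList) with
       | some j => if j ≠ i then String.ofList (pvRewrite line.toList) else line
       | none => line
     else line) :: pvPass2 first (i + 1) rest

def modify_atom_names_alt (pdb_lines : List String) : List String :=
  pvPass2 (pvFirst 0 pdb_lines PySem.Dict.empty) 0 pdb_lines

-- ===== PRECONDITION & SPEC =====
-- Pre_ excludes exactly the inputs on which the Python raises IndexError (atom_name[-1] on an empty
-- atom name): a HETATM line whose stripped cols 11:16 are empty while an earlier HETATM line already
-- carries the same residue+atom key. (My B raises there too.)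
def Pre_modify_atom_names (pdb_lines : List String) : Prop :=
  ∀ (j : Nat), (hj : j < pdb_lines.length) →
    ∀ (i : Nat), i < j →
      (hi : i < pdb_lines.length) →
        ¬ (pvIsHet (pdb_lines[j]).toList = true ∧ pvAtom (pdb_lines[j]).toList = [] ∧
           pvIsHet (pdb_lines[i]).toList = true ∧ pvKey (pdb_lines[i]).toList = pvKey (pdb_lines[j]).toList)
instance (pdb_lines : List String) : Decidable (Pre_modify_atom_names pdb_lines) := by
  unfold Pre_modify_atom_names; infer_instance

def pvWitness_modify_atom_names : List String :=
  ["HETATM    1  C1  LIG A   1", "HETATM    2  C1  LIG A   1", "ATOM      3  C1  LIG A   1"]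

def Spec_modify_atom_names (pdb_lines : List String) (out : List String) : Prop := out = modify_atom_names_alt pdb_lines
instance (pdb_lines : List String) (out : List String) : Decidable (Spec_modify_atom_names pdb_lines out) := by unfold Spec_modify_atom_names; infer_instance

-- ===== CLAIM (what is proved, stated in full; the proofs are below) =====
def Claim_equal_modify_atom_names : Prop := ∀ (pdb_lines : List String), Dom_modify_atom_names pdb_lines → Pre_modify_atom_names pdb_lines → Spec_modify_atom_names pdb_lines (modify_atom_names pdb_lines)

-- ===== LEMMAS AND PROOFS =====

-- the index of the first HETATM line (counting from i) in rest whose key is k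
def pvFirstIdx (k : List Char) : Int → List String → Option Int
  | _, [] => none
  | i, line :: rest =>
    if pvIsHet line.toList ∧ pvKey line.toList = k then some i else pvFirstIdx k (i + 1) rest

-- pass 1 computes exactly pvFirstIdx on top of what the accumulator already holds
theorem pvFirst_get? (rest : List String) : ∀ (i : Int) (d : PySem.Dict (List Char) Int) (k : List Char),
    (pvFirst i rest d).get? k = match d.get? k with
      | some v => some v
      | none => pvFirstIdx k i rest := by
  induction rest with
  | nil => intro i d k; cases h : d.get? k <;> simp [pvFirst, pvFirstIdx, h]
  | cons line rest ih =>
    intro i d k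
    simp only [pvFirst, pvFirstIdx]
    by_cases hhet : pvIsHet line.toList = true
    · by_cases hk : k = pvKey line.toList
      · rw [hk, if_pos hhet, ih, PySem.Dict.get?_setdefault_self]
        cases d.get? (pvKey line.toList) <;> simp [hhet]
      · rw [if_pos hhet, ih, PySem.Dict.get?_setdefault_of_ne _ _ hk]
        have hne : ¬ (pvIsHet line.toList = true ∧ pvKey line.toList = k) := fun h => hk h.2.symm
        cases d.get? k <;> simp [hne]
    · rw [if_neg hhet, ih]
      have hne : ¬ (pvIsHet line.toList = true ∧ pvKey line.toList = k) := fun h => hhet h.1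
      cases d.get? k <;> simp [hne]

-- main loop correspondence: A's threaded seen-set vs B's precomputed first-occurrence table
theorem pvLoopA_eq_pvPass2 (rest : List String) :
    ∀ (i : Int) (seen : PySem.Set (List Char)) (first : PySem.Dict (List Char) Int),
    (∀ k, k ∈ seen → ∃ j, first.get? k = some j ∧ j < i) →
    (∀ k, k ∉ seen → first.get? k = pvFirstIdx k i rest) →
    pvLoopA rest seen = pvPass2 first i rest := by
  induction rest with
  | nil => intro _ _ _ _ _; rfl
  | cons line rest ih =>
    intro i seen first Ha Hb
    simp only [pvLoopA, pvPass2]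
    by_cases hhet : pvIsHet line.toList = true
    · rw [if_pos hhet, if_pos hhet]
      by_cases hmem : pvKey line.toList ∈ seen
      · -- repeated key: both sides rewrite the line
        have hc : PySem.Set.contains seen (pvKey line.toList) = true := by
          simpa [PySem.Set.contains] using hmem
        obtain ⟨j, hj, hjlt⟩ := Ha _ hmem
        have hji : j ≠ i := by omega
        rw [if_pos hc, hj]
        congr 1
        · simp [hji]
        · refine ih (i + 1) seen first ?_ ?_
          · intro k hk; obtain ⟨j', h1, h2⟩ := Ha k hk; exact ⟨j', h1, by omega⟩
          · intro k hk
            have hne : ¬ (pvIsHet line.toList = true ∧ pvKey line.toList = k) := by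
              rintro ⟨_, rfl⟩; exact hk hmem
            rw [Hb k hk]; simp only [pvFirstIdx, if_neg hne]
      · -- first occurrence: both sides keep the line
        have hfst : first.get? (pvKey line.toList) = some i := by
          rw [Hb _ hmem]; simp [pvFirstIdx, hhet]
        rw [if_neg (by simpa using hmem), hfst]
        congr 1
        · simp
        refine ih (i + 1) (PySem.Set.add seen (pvKey line.toList)) first ?_ ?_
        · intro k hk
          rcases (PySem.Set.mem_add seen _ k).1 hk with h | rfl
          · obtain ⟨j', h1, h2⟩ := Ha k h; exact ⟨j', h1, by omega⟩
          · exact ⟨i, hfst, by omega⟩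
        · intro k hk
          have hk1 : k ∉ seen := fun h => hk ((PySem.Set.mem_add seen _ k).2 (Or.inl h))
          have hk2 : pvKey line.toList ≠ k := fun h =>
            hk ((PySem.Set.mem_add seen _ k).2 (Or.inr h.symm))
          have hne : ¬ (pvIsHet line.toList = true ∧ pvKey line.toList = k) := fun h => hk2 h.2
          rw [Hb k hk1]; simp only [pvFirstIdx, if_neg hne]
    · rw [if_neg hhet, if_neg hhet]
      congr 1
      refine ih (i + 1) seen first ?_ ?_
      · intro k hk; obtain ⟨j', h1, h2⟩ := Ha k hk; exact ⟨j', h1, by omega⟩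
      · intro k hk
        have hne : ¬ (pvIsHet line.toList = true ∧ pvKey line.toList = k) := fun h => hhet h.1
        rw [Hb k hk]; simp only [pvFirstIdx, if_neg hne]

-- ===== VERDICT (by name: the statement is the Claim_ definition above) =====
theorem modify_atom_names_spec : Claim_equal_modify_atom_names := by
  intro pdb_lines _ _
  unfold Spec_modify_atom_names modify_atom_names modify_atom_names_alt
  refine pvLoopA_eq_pvPass2 pdb_lines 0 PySem.Set.empty _ ?_ ?_
  · intro k hk; cases hk
  · intro k _
    rw [pvFirst_get? pdb_lines 0 PySem.Dict.empty k]
    simp [PySem.Dict.get?_empty]
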